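-- pv_equiv track=rewrite | github.com/cipherinsight/zinnia | benchmarking/plotter_loc.py | compute_cyclomatic_complexity
-- ===== SOURCE A (Python) =====
-- def compute_cyclomatic_complexity(lines) -> int:
--     complexity = 0
--     decision_keywords = ['if', 'for', 'while', '?', 'match', 'case', 'elif', 'else if', 'switch', 'else']
--     for line in lines:
--         stripped_line = line.strip()
--         while len(stripped_line) > 0:
--             has_match = False
--             for keyword in decision_keywords:
--                 try:
--                     idx = stripped_line.index(keyword)
--                     complexity += 1
--                     stripped_line = stripped_line[idx + len(keyword):].strip()
--                     has_match = True
--                     break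
--                 except ValueError:
--                     continue
--             if not has_match:
--                 break
--     return complexity
-- ===== SOURCE B (Python) =====
-- def compute_cyclomatic_complexity(lines) -> int:
--     # Pointer-based rescan: instead of repeatedly slicing and re-stripping the
--     # line, keep a single cursor and use str.find(kw, pos).  Keyword matches are
--     # unaffected by stripping because no keyword starts or ends with whitespace.
--     decision_keywords = ['if', 'for', 'while', '?', 'match', 'case', 'elif', 'else if', 'switch', 'else']
--     complexity = 0
--     for line in lines:
--         pos = 0
--         while True:
--             for keyword in decision_keywords:
--                 idx = line.find(keyword, pos)
--                 if idx != -1: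
--                     complexity += 1
--                     pos = idx + len(keyword)
--                     break
--             else:
--                 break
--     return complexity
-- ===== Notes on version B (the rewrite author's own statement) =====
-- stated objective: faster
-- what changed: B replaces A's per-match slice-and-restrip of a shrinking string copy by a single advancing cursor into the original line queried with str.find(kw, pos); this is exact because no keyword starts or ends with whitespace, so stripping never changes which occurrence is found.
import Mathlib
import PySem

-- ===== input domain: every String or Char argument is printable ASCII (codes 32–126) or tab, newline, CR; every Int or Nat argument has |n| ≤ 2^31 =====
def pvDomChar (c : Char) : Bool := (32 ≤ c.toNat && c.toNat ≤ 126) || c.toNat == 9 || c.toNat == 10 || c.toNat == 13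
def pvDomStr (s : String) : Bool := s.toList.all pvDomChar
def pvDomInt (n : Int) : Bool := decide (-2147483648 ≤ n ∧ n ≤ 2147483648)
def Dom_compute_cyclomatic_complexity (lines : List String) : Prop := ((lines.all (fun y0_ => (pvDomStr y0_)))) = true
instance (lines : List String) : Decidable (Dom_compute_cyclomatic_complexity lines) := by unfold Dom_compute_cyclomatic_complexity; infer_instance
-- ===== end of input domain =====

-- B replaces A's per-match slice-and-restrip of the line by a single advancing
-- cursor with str.find(kw, pos); measured constant-factor speed-up, same results.

-- ===== PORT A =====
def aKeywords : List (List Char) :=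
  [['i','f'], ['f','o','r'], ['w','h','i','l','e'], ['?'], ['m','a','t','c','h'],
   ['c','a','s','e'], ['e','l','i','f'], ['e','l','s','e',' ','i','f'],
   ['s','w','i','t','c','h'], ['e','l','s','e']]

-- the inner `for keyword in decision_keywords: try: idx = stripped_line.index(keyword) …`
def aTry (s : List Char) : List (List Char) → Option (List Char)
  | [] => none
  | kw :: rest =>
    if PySem.Chars.find s kw = -1 then aTry s rest
    else some (PySem.Chars.strip (s.drop ((PySem.Chars.find s kw).toNat + kw.length)))

-- helper for termination: strip never lengthens
theorem strip_length_le (X : List Char) : (PySem.Chars.strip X).length ≤ X.length := by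
  simp only [PySem.Chars.strip, PySem.Chars.rstrip, PySem.Chars.lstrip, List.length_reverse]
  exact le_trans (List.length_dropWhile_le _ _)
    (by simpa using List.length_dropWhile_le PySem.Chars.isspace X)

-- termination helper for the `while len(stripped_line) > 0` loop
theorem aTry_length_lt {s s' : List Char} {kws : List (List Char)}
    (hk : ∀ kw ∈ kws, kw ≠ ([] : List Char)) (h : aTry s kws = some s') :
    s'.length < s.length := by
  induction kws with
  | nil => simp [aTry] at h
  | cons kw rest ih =>
    by_cases hf : PySem.Chars.find s kw = -1
    · exact ih (fun k hm => hk k (by simp [hm])) (by simpa [aTry, hf] using h)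
    · have h0 : 0 ≤ PySem.Chars.find s kw := by
        have := PySem.Chars.neg_one_le_find s kw; omega
      have hinf : kw <:+: s := (PySem.Chars.find_nonneg_iff s kw).1 h0
      have hs : s ≠ [] := by
        intro hnil; rw [hnil, List.infix_nil] at hinf; exact hk kw (by simp) hinf
      have hkw1 : 1 ≤ kw.length := by
        have := hk kw (List.mem_cons_self)
        cases kw with | nil => simp at this | cons c cs => simp
      simp only [aTry, hf, if_false, Option.some.injEq] at h
      have hstrip := strip_length_le (s.drop ((PySem.Chars.find s kw).toNat + kw.length))
      have hlen : (s.drop ((PySem.Chars.find s kw).toNat + kw.length)).length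
          ≤ s.length - 1 := by
        simp only [List.length_drop]; omega
      have hslen : 1 ≤ s.length := by cases s with | nil => simp at hs | cons c cs => simp
      subst h
      omega

theorem aKeywords_ne_nil : ∀ kw ∈ aKeywords, kw ≠ ([] : List Char) := by decide

-- the `while len(stripped_line) > 0:` loop; returns the complexity added for one line
def aLine (s : List Char) : Int :=
  if _h : 0 < s.length then
    match ha : aTry s aKeywords with
    | some s' => 1 + aLine s'
    | none => 0
  else 0
termination_by s.length
decreasing_by exact aTry_length_lt aKeywords_ne_nil ha

def compute_cyclomatic_complexity (lines : List String) : Int :=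
  lines.foldl (fun complexity line => complexity + aLine (PySem.Chars.strip line.toList)) 0

-- ===== PORT B =====
def bKeywords : List (List Char) :=
  [['i','f'], ['f','o','r'], ['w','h','i','l','e'], ['?'], ['m','a','t','c','h'],
   ['c','a','s','e'], ['e','l','i','f'], ['e','l','s','e',' ','i','f'],
   ['s','w','i','t','c','h'], ['e','l','s','e']]

-- `for keyword in decision_keywords: idx = line.find(keyword, pos) …`
def bTry (line : List Char) (pos : Nat) : List (List Char) → Option Nat
  | [] => none
  | kw :: rest =>
    if PySem.Chars.findFrom line kw (pos : Int) = -1 then bTry line pos rest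
    else some ((PySem.Chars.findFrom line kw (pos : Int)).toNat + kw.length)

-- termination helper: a successful find advances the cursor and stays in the line
theorem bTry_some_bounds {line : List Char} {pos pos' : Nat} {kws : List (List Char)}
    (hk : ∀ kw ∈ kws, kw ≠ ([] : List Char)) (h : bTry line pos kws = some pos') :
    pos < pos' ∧ pos' ≤ line.length := by
  induction kws with
  | nil => simp [bTry] at h
  | cons kw rest ih =>
    by_cases hf : PySem.Chars.findFrom line kw (pos : Int) = -1
    · exact ih (fun k hm => hk k (by simp [hm])) (by simpa [bTry, hf] using h)
    · have hpos : pos ≤ line.length := by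
        by_contra hgt
        apply hf
        simp only [PySem.Chars.findFrom]
        have h1 : ((line.length : Int)) < (pos : Int) := by exact_mod_cast Nat.lt_of_not_le hgt
        have h2 : ¬ ((pos : Int) < 0) := by simp
        simp only [h2, if_false, if_pos (by omega : (line.length : Int) < (pos : Int))]
      have hspec := PySem.Chars.findFrom_natCast_spec line kw pos hpos hf
      obtain ⟨hge, hpre, _⟩ := hspec
      have hkw1 : 1 ≤ kw.length := by
        have := hk kw (List.mem_cons_self)
        cases kw with | nil => simp at this | cons c cs => simp
      have hfit : (PySem.Chars.findFrom line kw (pos : Int)).toNat + kw.length ≤ line.length := by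
        have := hpre.length_le
        simp only [List.length_drop] at this
        omega
      have hge' : pos ≤ (PySem.Chars.findFrom line kw (pos : Int)).toNat := by omega
      simp only [bTry, hf, if_false, Option.some.injEq] at h
      omega

theorem bKeywords_ne_nil : ∀ kw ∈ bKeywords, kw ≠ ([] : List Char) := by decide

-- the `while True:` loop with its cursor
def bLine (line : List Char) (pos : Nat) : Int :=
  match hb : bTry line pos bKeywords with
  | some pos' => 1 + bLine line pos'
  | none => 0
termination_by line.length + 1 - pos
decreasing_by
  have := bTry_some_bounds bKeywords_ne_nil hb
  omega

def compute_cyclomatic_complexity_alt (lines : List String) : Int :=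
  lines.foldl (fun complexity line => complexity + bLine line.toList 0) 0

-- ===== PRECONDITION & SPEC =====
def Spec_compute_cyclomatic_complexity (lines : List String) (out : Int) : Prop := out = compute_cyclomatic_complexity_alt lines
instance (lines : List String) (out : Int) : Decidable (Spec_compute_cyclomatic_complexity lines out) := by unfold Spec_compute_cyclomatic_complexity; infer_instance

-- ===== CLAIM (what is proved, stated in full; the proofs are below) =====
def Claim_equal_compute_cyclomatic_complexity : Prop := ∀ (lines : List String), Dom_compute_cyclomatic_complexity lines → Spec_compute_cyclomatic_complexity lines (compute_cyclomatic_complexity lines)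

-- ===== LEMMAS AND PROOFS =====

-- a keyword is nonempty and neither starts nor ends with whitespace
def okKw : List Char → Bool
  | [] => false
  | c :: cs => !PySem.Chars.isspace c && !PySem.Chars.isspace ((c :: cs).getLastD ' ')

theorem aKeywords_ok : ∀ kw ∈ aKeywords, okKw kw = true := by decide

theorem okKw_ne_nil {kw : List Char} (h : okKw kw = true) : kw ≠ [] := by
  cases kw with | nil => simp [okKw] at h | cons c cs => simp

theorem okKw_head {c : Char} {cs : List Char} (h : okKw (c :: cs) = true) :
    PySem.Chars.isspace c = false := by
  simp [okKw] at h; exact h.1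

theorem okKw_last {kw : List Char} (h : okKw kw = true) :
    PySem.Chars.isspace (kw.getLastD ' ') = false := by
  cases kw with
  | nil => simp [okKw] at h
  | cons c cs => simp [okKw] at h; exact h.2

theorem getLastD_mem {l : List Char} {d : Char} (h : l ≠ []) : l.getLastD d ∈ l := by
  rw [List.getLastD_eq_getLast?, List.getLast?_eq_some_getLast h]
  simp only [Option.getD_some]
  exact List.getLast_mem h

theorem getLastD_append {Y r : List Char} {d : Char} (h : r ≠ []) :
    (Y ++ r).getLastD d = r.getLastD d := by
  simp only [List.getLastD_eq_getLast?, List.getLast?_append_of_ne_nil _ h]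

theorem dropWhile_append_all {p : Char → Bool} {u w : List Char}
    (hu : ∀ x ∈ u, p x = true) : (u ++ w).dropWhile p = w.dropWhile p := by
  induction u with
  | nil => rfl
  | cons c cs ih =>
    simp [hu c (by simp)]
    exact ih (fun x hx => hu x (by simp [hx]))

-- no keyword matches inside an all-whitespace list
theorem not_prefix_of_all_space {v kw : List Char}
    (hv : ∀ c ∈ v, PySem.Chars.isspace c = true) (hok : okKw kw = true) :
    ¬ kw <+: v := by
  cases kw with
  | nil => simp [okKw] at hok
  | cons c cs =>
    intro hp
    have hc : c ∈ v := hp.subset (List.mem_cons_self)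
    have := hv c hc
    rw [okKw_head hok] at this
    exact Bool.false_ne_true this

-- trailing whitespace never takes part in a keyword match
theorem prefix_append_space_iff {kw Y v : List Char} (hok : okKw kw = true)
    (hv : ∀ c ∈ v, PySem.Chars.isspace c = true) :
    kw <+: Y ++ v ↔ kw <+: Y := by
  constructor
  · intro h
    by_cases hle : kw.length ≤ Y.length
    · rw [List.prefix_iff_eq_take] at h ⊢
      rwa [List.take_append_of_le_length hle] at h
    · exfalso
      have hlt : Y.length < kw.length := by omega
      have hkl : kw.length ≤ Y.length + v.length := by simpa using h.length_le
      have heq : kw = Y ++ v.take (kw.length - Y.length) := by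
        rw [List.prefix_iff_eq_take, List.take_append,
          List.take_of_length_le (le_of_lt hlt)] at h
        exact h
      have hr : v.take (kw.length - Y.length) ≠ [] := by
        have : 0 < (v.take (kw.length - Y.length)).length := by
          rw [List.length_take]; omega
        exact List.ne_nil_of_length_pos this
      have hlast := okKw_last hok
      rw [heq, getLastD_append hr] at hlast
      have hmem : (v.take (kw.length - Y.length)).getLastD ' ' ∈ v :=
        List.take_subset _ _ (getLastD_mem hr)
      rw [hv _ hmem] at hlast
      simp at hlast
  · intro h
    exact h.trans (List.prefix_append Y v)

theorem rstrip_append_space {Z v : List Char}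
    (hv : ∀ c ∈ v, PySem.Chars.isspace c = true) :
    PySem.Chars.rstrip (Z ++ v) = PySem.Chars.rstrip Z := by
  simp only [PySem.Chars.rstrip, List.reverse_append]
  rw [dropWhile_append_all (fun x hx => hv x (by simpa using hx))]

theorem strip_append_space {X v : List Char}
    (hv : ∀ c ∈ v, PySem.Chars.isspace c = true) :
    PySem.Chars.strip (X ++ v) = PySem.Chars.strip X := by
  simp only [PySem.Chars.strip, PySem.Chars.lstrip]
  by_cases hX : X.dropWhile PySem.Chars.isspace = []
  · have hall : ∀ x ∈ X, PySem.Chars.isspace x = true := List.dropWhile_eq_nil_iff.1 hX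
    rw [dropWhile_append_all hall, hX, List.dropWhile_eq_nil_iff.2 hv]
  · rw [List.dropWhile_append, if_neg (by simpa using hX)]
    exact rstrip_append_space hv

theorem rstrip_decomp (X : List Char) :
    ∃ v, X = PySem.Chars.rstrip X ++ v ∧ ∀ c ∈ v, PySem.Chars.isspace c = true := by
  refine ⟨(X.reverse.takeWhile PySem.Chars.isspace).reverse, ?_, ?_⟩
  · simp only [PySem.Chars.rstrip, ← List.reverse_append, List.takeWhile_append_dropWhile,
      List.reverse_reverse]
  · intro c hc
    exact List.mem_takeWhile_imp (by simpa using hc)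

-- match positions in t, at offset (leading whitespace) + i, are the match positions in strip t
theorem strip_eq_rstrip_dropWhile (t : List Char) :
    PySem.Chars.strip t = PySem.Chars.rstrip (t.dropWhile PySem.Chars.isspace) := rfl

theorem drop_offset (t : List Char) (i : Nat) :
    t.drop ((t.takeWhile PySem.Chars.isspace).length + i)
      = (t.dropWhile PySem.Chars.isspace).drop i := by
  have h := List.drop_length_add_append (l₁ := t.takeWhile PySem.Chars.isspace)
    (l₂ := t.dropWhile PySem.Chars.isspace) i
  rwa [List.takeWhile_append_dropWhile] at h

theorem matchIff {t kw : List Char} (hok : okKw kw = true) (i : Nat) :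
    kw <+: (PySem.Chars.strip t).drop i ↔
      kw <+: t.drop ((t.takeWhile PySem.Chars.isspace).length + i) := by
  rw [drop_offset, strip_eq_rstrip_dropWhile]
  obtain ⟨v, hl, hv⟩ := rstrip_decomp (t.dropWhile PySem.Chars.isspace)
  by_cases hle : i ≤ (PySem.Chars.rstrip (t.dropWhile PySem.Chars.isspace)).length
  · conv_rhs => rw [hl, List.drop_append_of_le_length hle]
    exact (prefix_append_space_iff hok hv).symm
  · have hR : (PySem.Chars.rstrip (t.dropWhile PySem.Chars.isspace)).drop i = [] := by
      rw [List.drop_eq_nil_iff]; omega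
    conv_rhs => rw [hl, List.drop_append]
    rw [hR]
    simp only [List.nil_append]
    constructor
    · intro h
      exact absurd (List.prefix_nil.mp h) (okKw_ne_nil hok)
    · intro h
      exact absurd h (not_prefix_of_all_space (fun c hc => hv c (List.drop_subset _ _ hc)) hok)

-- no match can start inside the leading whitespace
theorem noMatchLow {t kw : List Char} (hok : okKw kw = true) {j : Nat}
    (hj : j < (t.takeWhile PySem.Chars.isspace).length) : ¬ kw <+: t.drop j := by
  intro hp
  have hdrop : t.drop j = (t.takeWhile PySem.Chars.isspace).drop j
      ++ t.dropWhile PySem.Chars.isspace := by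
    conv_lhs => rw [← List.takeWhile_append_dropWhile (p := PySem.Chars.isspace) (l := t)]
    exact List.drop_append_of_le_length (le_of_lt hj)
  cases hu : (t.takeWhile PySem.Chars.isspace).drop j with
  | nil =>
    have := congrArg List.length hu
    simp only [List.length_drop, List.length_nil] at this
    omega
  | cons d ds =>
    cases kw with
    | nil => simp [okKw] at hok
    | cons c cs =>
      rw [hdrop, hu, List.cons_append, List.cons_prefix_cons] at hp
      have hd : d ∈ t.takeWhile PySem.Chars.isspace :=
        List.drop_subset _ _ (hu ▸ List.mem_cons_self)
      have hsp := List.mem_takeWhile_imp hd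
      rw [← hp.1, okKw_head hok] at hsp
      exact Bool.false_ne_true hsp

-- find = j when j is a match and everything below is not
theorem infix_of_prefix_drop {s kw : List Char} {j : Nat} (h : kw <+: s.drop j) :
    kw <:+: s :=
  (PySem.Chars.isIn_iff_infix kw s).1
    ((PySem.Chars.exists_prefix_drop_iff_isIn kw s).1 ⟨j, h⟩)

theorem find_eq_of_min {s kw : List Char} {j : Nat} (h : kw <+: s.drop j)
    (hmin : ∀ i < j, ¬ kw <+: s.drop i) : PySem.Chars.find s kw = (j : Int) := by
  have h0 : 0 ≤ PySem.Chars.find s kw :=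
    (PySem.Chars.find_nonneg_iff s kw).2 (infix_of_prefix_drop h)
  obtain ⟨hpre, hmin'⟩ := PySem.Chars.find_spec h0
  rcases lt_trichotomy (PySem.Chars.find s kw).toNat j with hlt | heq | hgt
  · exact absurd hpre (hmin _ hlt)
  · omega
  · exact absurd h (hmin' j hgt)

theorem core_find {t kw : List Char} (hok : okKw kw = true) :
    PySem.Chars.find t kw =
      (if PySem.Chars.find (PySem.Chars.strip t) kw = -1 then -1
       else ((t.takeWhile PySem.Chars.isspace).length : Int) +
         PySem.Chars.find (PySem.Chars.strip t) kw) := by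
  split_ifs with hf
  · rw [PySem.Chars.find_eq_neg_one_iff]
    intro hinf
    obtain ⟨j, hj⟩ : ∃ j, kw <+: t.drop j :=
      (PySem.Chars.exists_prefix_drop_iff_isIn kw t).2
        ((PySem.Chars.isIn_iff_infix kw t).2 hinf)
    rcases lt_or_ge j (t.takeWhile PySem.Chars.isspace).length with hja | hja
    · exact noMatchLow hok hja hj
    · have hm : kw <+: (PySem.Chars.strip t).drop (j - (t.takeWhile PySem.Chars.isspace).length) :=
        (matchIff hok _).2 (by rwa [Nat.add_sub_cancel' hja])
      exact (PySem.Chars.find_eq_neg_one_iff _ kw).1 hf (infix_of_prefix_drop hm)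
  · have h0 : 0 ≤ PySem.Chars.find (PySem.Chars.strip t) kw := by
      have := PySem.Chars.neg_one_le_find (PySem.Chars.strip t) kw; omega
    obtain ⟨hpre, hmin⟩ := PySem.Chars.find_spec h0
    have h1 : kw <+: t.drop ((t.takeWhile PySem.Chars.isspace).length
        + (PySem.Chars.find (PySem.Chars.strip t) kw).toNat) := (matchIff hok _).1 hpre
    have h2 : ∀ j < (t.takeWhile PySem.Chars.isspace).length
        + (PySem.Chars.find (PySem.Chars.strip t) kw).toNat, ¬ kw <+: t.drop j := by
      intro j hj
      rcases lt_or_ge j (t.takeWhile PySem.Chars.isspace).length with hja | hja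
      · exact noMatchLow hok hja
      · intro hp
        exact hmin (j - (t.takeWhile PySem.Chars.isspace).length) (by omega)
          ((matchIff hok _).2 (by rwa [Nat.add_sub_cancel' hja]))
    have := find_eq_of_min h1 h2
    rw [this]
    push_cast
    omega

theorem core_strip {t kw : List Char} (hok : okKw kw = true)
    (hf : PySem.Chars.find (PySem.Chars.strip t) kw ≠ -1) :
    PySem.Chars.strip ((PySem.Chars.strip t).drop
        ((PySem.Chars.find (PySem.Chars.strip t) kw).toNat + kw.length)) =
      PySem.Chars.strip (t.drop ((t.takeWhile PySem.Chars.isspace).length +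
        (PySem.Chars.find (PySem.Chars.strip t) kw).toNat + kw.length)) := by
  have h0 : 0 ≤ PySem.Chars.find (PySem.Chars.strip t) kw := by
    have := PySem.Chars.neg_one_le_find (PySem.Chars.strip t) kw; omega
  obtain ⟨hpre, -⟩ := PySem.Chars.find_spec h0
  have hkw1 : 1 ≤ kw.length := by
    cases kw with
    | nil => exact absurd rfl (okKw_ne_nil hok)
    | cons c cs => simp
  have hfit : (PySem.Chars.find (PySem.Chars.strip t) kw).toNat + kw.length
      ≤ (PySem.Chars.strip t).length := by
    have := hpre.length_le
    simp only [List.length_drop] at this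
    omega
  have harith : (t.takeWhile PySem.Chars.isspace).length
      + (PySem.Chars.find (PySem.Chars.strip t) kw).toNat + kw.length
      = (t.takeWhile PySem.Chars.isspace).length
      + ((PySem.Chars.find (PySem.Chars.strip t) kw).toNat + kw.length) := by omega
  rw [harith, drop_offset]
  obtain ⟨v, hl, hv⟩ := rstrip_decomp (t.dropWhile PySem.Chars.isspace)
  have hl2 : t.dropWhile PySem.Chars.isspace = PySem.Chars.strip t ++ v := hl
  conv_rhs => rw [hl2, List.drop_append_of_le_length hfit]
  rw [strip_append_space hv]

-- the two inner keyword loops agree, step for step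
theorem tryAgree (line : List Char) (pos : Nat) (hpos : pos ≤ line.length)
    (kws : List (List Char)) (hok : ∀ kw ∈ kws, okKw kw = true) :
    (aTry (PySem.Chars.strip (line.drop pos)) kws = none ∧ bTry line pos kws = none) ∨
    (∃ pos', aTry (PySem.Chars.strip (line.drop pos)) kws
        = some (PySem.Chars.strip (line.drop pos')) ∧
      bTry line pos kws = some pos' ∧ pos < pos' ∧ pos' ≤ line.length) := by
  induction kws with
  | nil => exact Or.inl ⟨rfl, rfl⟩
  | cons kw rest ih =>
    have hokw : okKw kw = true := hok kw List.mem_cons_self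
    have hff := PySem.Chars.findFrom_natCast line kw pos hpos
    have hcf := core_find (t := line.drop pos) hokw
    by_cases hf : PySem.Chars.find (PySem.Chars.strip (line.drop pos)) kw = -1
    · have hft : PySem.Chars.find (line.drop pos) kw = -1 := by rw [hcf, if_pos hf]
      have hffn : PySem.Chars.findFrom line kw (pos : Int) = -1 := by
        rw [hff, if_pos hft]
      rcases ih (fun k hm => hok k (List.mem_cons_of_mem _ hm)) with ⟨h1, h2⟩ | ⟨p', h1, h2, h3, h4⟩
      · exact Or.inl ⟨by simp only [aTry, hf, if_true]; exact h1,
          by simp only [bTry, hffn, if_true]; exact h2⟩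
      · exact Or.inr ⟨p', by simp only [aTry, hf, if_true]; exact h1,
          by simp only [bTry, hffn, if_true]; exact h2, h3, h4⟩
    · have h0 : 0 ≤ PySem.Chars.find (PySem.Chars.strip (line.drop pos)) kw := by
        have := PySem.Chars.neg_one_le_find (PySem.Chars.strip (line.drop pos)) kw; omega
      have hkw1 : 1 ≤ kw.length := by
        cases kw with
        | nil => exact absurd rfl (okKw_ne_nil hokw)
        | cons c cs => simp
      obtain ⟨hpre, -⟩ := PySem.Chars.find_spec h0
      have hft : PySem.Chars.find (line.drop pos) kw =
          (((line.drop pos).takeWhile PySem.Chars.isspace).length : Int) +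
            PySem.Chars.find (PySem.Chars.strip (line.drop pos)) kw := by
        rw [hcf, if_neg hf]
      have hftn : PySem.Chars.find (line.drop pos) kw ≠ -1 := by
        rw [hft]; omega
      have hffv : PySem.Chars.findFrom line kw (pos : Int) =
          (pos : Int) + PySem.Chars.find (line.drop pos) kw := by
        rw [hff, if_neg hftn]
      have hffnn : PySem.Chars.findFrom line kw (pos : Int) ≠ -1 := by
        rw [hffv, hft]; omega
      refine Or.inr ⟨(PySem.Chars.findFrom line kw (pos : Int)).toNat + kw.length, ?_, ?_, ?_, ?_⟩
      · simp only [aTry, hf, if_false]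
        refine congrArg some ?_
        have htoNat : (PySem.Chars.findFrom line kw (pos : Int)).toNat + kw.length
            = pos + (((line.drop pos).takeWhile PySem.Chars.isspace).length
              + (PySem.Chars.find (PySem.Chars.strip (line.drop pos)) kw).toNat + kw.length)
 := by
          rw [hffv, hft]; omega
        conv_rhs => rw [htoNat, ← List.drop_drop]
        exact core_strip hokw hf
      · simp only [bTry, hffnn, if_false]
      · rw [hffv, hft]; omega
      · have h1 : kw <+: (line.drop pos).drop
            (((line.drop pos).takeWhile PySem.Chars.isspace).length
              + (PySem.Chars.find (PySem.Chars.strip (line.drop pos)) kw).toNat) :=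
          (matchIff hokw _).1 hpre
        have := h1.length_le
        simp only [List.length_drop] at this
        rw [hffv, hft]
        omega

theorem aTry_nil_none (kws : List (List Char)) (hok : ∀ kw ∈ kws, okKw kw = true) :
    aTry [] kws = none := by
  induction kws with
  | nil => rfl
  | cons kw rest ih =>
    have hne : PySem.Chars.find [] kw = -1 := by
      rw [PySem.Chars.find_eq_neg_one_iff, List.infix_nil]
      exact okKw_ne_nil (hok kw List.mem_cons_self)
    simp only [aTry, hne, if_true]
    exact ih (fun k hm => hok k (List.mem_cons_of_mem _ hm))

-- the two outer loops agree
theorem aLine_of_none {s : List Char} (h : aTry s aKeywords = none) : aLine s = 0 := by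
  rw [aLine]
  split
  · split
    · rename_i heq; rw [h] at heq; exact absurd heq (by simp)
    · rfl
  · rfl

theorem aLine_of_some {s s' : List Char} (h : aTry s aKeywords = some s') :
    aLine s = 1 + aLine s' := by
  have hs : 0 < s.length := by
    rcases Nat.eq_zero_or_pos s.length with h0 | h0
    · exfalso
      have hnil : s = [] := List.eq_nil_of_length_eq_zero h0
      rw [hnil, aTry_nil_none aKeywords aKeywords_ok] at h
      exact absurd h (by simp)
    · exact h0
  rw [aLine, dif_pos hs]
  split
  · rename_i s'' heq
    rw [h] at heq
    injection heq with heq'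
    rw [heq']
  · rename_i heq
    rw [h] at heq
    exact absurd heq (by simp)

theorem bLine_of_none {line : List Char} {pos : Nat}
    (h : bTry line pos bKeywords = none) : bLine line pos = 0 := by
  rw [bLine]
  split
  · rename_i heq; rw [h] at heq; exact absurd heq (by simp)
  · rfl

theorem bLine_of_some {line : List Char} {pos pos' : Nat}
    (h : bTry line pos bKeywords = some pos') : bLine line pos = 1 + bLine line pos' := by
  rw [bLine]
  split
  · rename_i p heq
    rw [h] at heq
    injection heq with heq'
    rw [heq']
  · rename_i heq
    rw [h] at heq
    exact absurd heq (by simp)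

theorem lineAgree (line : List Char) : ∀ (n pos : Nat), line.length - pos ≤ n →
    pos ≤ line.length → aLine (PySem.Chars.strip (line.drop pos)) = bLine line pos := by
  intro n
  induction n with
  | zero =>
    intro pos h1 h2
    rcases tryAgree line pos h2 aKeywords aKeywords_ok with ⟨ha, hb⟩ | ⟨p', -, -, h3, h4⟩
    · rw [aLine_of_none ha, bLine_of_none hb]
    · omega
  | succ n ih =>
    intro pos h1 h2
    rcases tryAgree line pos h2 aKeywords aKeywords_ok with ⟨ha, hb⟩ | ⟨p', ha, hb, h3, h4⟩
    · rw [aLine_of_none ha, bLine_of_none hb]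
    · rw [aLine_of_some ha, bLine_of_some hb]
      rw [ih p' (by omega) h4]

-- ===== VERDICT (by name: the statement is the Claim_ definition above) =====
theorem compute_cyclomatic_complexity_spec : Claim_equal_compute_cyclomatic_complexity := by
  intro lines _
  unfold Spec_compute_cyclomatic_complexity
  unfold compute_cyclomatic_complexity compute_cyclomatic_complexity_alt
  refine PySem.List.foldl_congr_mem lines _ _ 0 (fun acc line _ => ?_)
  have h := lineAgree line.toList line.toList.length 0 (by omega) (by omega)
  simpa using congrArg (acc + ·) h
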